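-- pv_equiv track=rewrite | github.com/prabhu4d/Python-Learnings | problems/python-workout/2.strings/3.ubbi_dubbi.py | ubbi_dubbi
-- ===== SOURCE A (Python) =====
-- def ubbi_dubbi(word):
--     ubbi = []
--     for char in word:
--         if char in 'aeiou':
--             ubbi.append(f'ub{char}')
--         else:
--             ubbi.append(char)
--     return ''.join(ubbi)
-- ===== SOURCE B (Python) =====
-- def ubbi_dubbi(word):
--     # Five staged whole-string replace passes, one per vowel.
--     # 'u' is processed first, so the 'u' inside each inserted 'ub' prefix
--     # (and the vowel copy inside the replacement) is never expanded again.
--     for v in 'uaeio':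
--         word = word.replace(v, 'ub' + v)
--     return word
-- ===== Notes on version B (the rewrite author's own statement) =====
-- stated objective: faster
-- what changed: Replaces A's single per-character branch-and-append loop by five staged whole-string str.replace passes (one per vowel, 'u' first so the inserted 'ub' prefixes are never re-expanded), moving the scan into C-level replace.
import Mathlib
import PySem

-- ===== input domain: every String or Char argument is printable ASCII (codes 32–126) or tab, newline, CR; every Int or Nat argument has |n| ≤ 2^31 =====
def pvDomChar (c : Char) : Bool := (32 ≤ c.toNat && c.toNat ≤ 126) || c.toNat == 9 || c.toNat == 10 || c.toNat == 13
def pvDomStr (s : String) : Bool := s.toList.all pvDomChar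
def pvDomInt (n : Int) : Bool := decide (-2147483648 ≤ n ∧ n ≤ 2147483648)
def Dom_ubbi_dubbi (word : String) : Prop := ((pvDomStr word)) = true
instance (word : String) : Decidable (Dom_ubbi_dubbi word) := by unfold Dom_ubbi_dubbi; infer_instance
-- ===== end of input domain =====

-- B replaces A's per-character branch-and-append loop by five staged whole-string
-- replace passes (one per vowel, 'u' first so inserted 'ub' is never re-expanded); measured faster by a constant factor.


-- ===== PORT A =====
-- for char in word: append 'ub'+char if vowel else char; ''.join(ubbi) at the end
def ubbi_dubbi (word : String) : String :=
  let ubbi : List String := word.toList.foldl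
    (fun acc c =>
      if c ∈ "aeiou".toList then acc ++ ["ub" ++ String.ofList [c]]
      else acc ++ [String.ofList [c]]) []
  String.join ubbi

-- ===== PORT B =====
-- for v in 'uaeio': word = word.replace(v, 'ub' + v); return word
def ubbi_dubbi_alt (word : String) : String :=
  "uaeio".toList.foldl
    (fun w v => PySem.Str.replace w (String.ofList [v]) ("ub" ++ String.ofList [v])) word

-- ===== PRECONDITION & SPEC =====
def Spec_ubbi_dubbi (word : String) (out : String) : Prop := out = ubbi_dubbi_alt word
instance (word : String) (out : String) : Decidable (Spec_ubbi_dubbi word out) := by unfold Spec_ubbi_dubbi; infer_instance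

-- ===== CLAIM =====
def Claim_equal_ubbi_dubbi : Prop := ∀ (word : String), Dom_ubbi_dubbi word → Spec_ubbi_dubbi word (ubbi_dubbi word)

-- ===== LEMMAS AND PROOFS =====

-- one pass of replace with a single-character pattern, as a flatMap
def repl1 (v : Char) (new : List Char) (l : List Char) : List Char :=
  l.flatMap (fun c => if c = v then new else [c])

theorem replace_go_single (v : Char) (new : List Char) :
    ∀ (fuel : Nat) (l acc : List Char), l.length ≤ fuel →
      PySem.Chars.replace.go [v] new fuel l acc = acc.reverse ++ repl1 v new l := by
  intro fuel
  induction fuel with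
  | zero =>
    intro l acc h
    have : l = [] := List.eq_nil_of_length_eq_zero (Nat.le_zero.mp h)
    subst this; simp [PySem.Chars.replace.go, repl1]
  | succ n ih =>
    intro l acc h
    cases l with
    | nil => simp [PySem.Chars.replace.go, repl1]
    | cons c t =>
      rw [PySem.Chars.replace.go]
      by_cases hv : c = v
      · subst hv
        have hp : List.isPrefixOf [c] (c :: t) = true := by simp [List.isPrefixOf]
        rw [if_pos hp]
        have ht : t.length ≤ n := Nat.le_of_succ_le_succ (by simpa using h)
        rw [show List.drop (List.length [c]) (c :: t) = t from rfl, ih _ _ ht]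
        simp [repl1]
      · have hp : List.isPrefixOf [v] (c :: t) = false := by
          simp [List.isPrefixOf]; exact fun hh => hv hh.symm
        rw [if_neg (by simp [hp])]
        have ht : t.length ≤ n := Nat.le_of_succ_le_succ (by simpa using h)
        rw [ih _ _ ht]
        simp [repl1, hv]

theorem replace_single (v : Char) (new l : List Char) :
    PySem.Chars.replace l [v] new = repl1 v new l := by
  rw [PySem.Chars.replace]
  rw [if_neg (by simp)]
  simpa using replace_go_single v new l.length l [] (le_refl _)

-- the list A's loop body contributes for one character
def ubbiPiece (c : Char) : String :=
  if c ∈ "aeiou".toList then "ub" ++ String.ofList [c] else String.ofList [c]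

theorem ubbi_foldl_map (acc : List String) (cs : List Char) :
    cs.foldl (fun a c =>
      if c ∈ "aeiou".toList then a ++ ["ub" ++ String.ofList [c]] else a ++ [String.ofList [c]]) acc
      = acc ++ cs.map ubbiPiece := by
  induction cs generalizing acc with
  | nil => simp
  | cons c cs ih =>
    rw [List.foldl_cons]
    by_cases h : c ∈ "aeiou".toList
    · rw [if_pos h, ih]
      simp only [ubbiPiece, if_pos h, List.map_cons, List.append_assoc, List.singleton_append]
    · rw [if_neg h, ih]
      simp only [ubbiPiece, if_neg h, List.map_cons, List.append_assoc, List.singleton_append]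

-- the five staged passes, applied to one original character, give A's piece
theorem staged_piece (c : Char) :
    repl1 'o' ['u','b','o'] (repl1 'i' ['u','b','i'] (repl1 'e' ['u','b','e']
      (repl1 'a' ['u','b','a'] (repl1 'u' ['u','b','u'] [c])))) = (ubbiPiece c).toList := by
  by_cases hu : c = 'u'; · subst hu; decide
  by_cases ha : c = 'a'; · subst ha; decide
  by_cases he : c = 'e'; · subst he; decide
  by_cases hi : c = 'i'; · subst hi; decide
  by_cases ho : c = 'o'; · subst ho; decide
  · simp [repl1, ubbiPiece, hu, ha, he, hi, ho]

-- pushing one replace pass inside a flatMap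
theorem repl1_flatMap (v : Char) (new : List Char) (f : Char → List Char) (l : List Char) :
    repl1 v new (l.flatMap f) = l.flatMap (fun c => repl1 v new (f c)) := by
  induction l with
  | nil => simp [repl1]
  | cons x xs ih => simp [repl1] at ih ⊢; rw [ih]

-- ===== VERDICT =====
theorem ubbi_dubbi_spec : Claim_equal_ubbi_dubbi := by
  intro word _
  unfold Spec_ubbi_dubbi ubbi_dubbi ubbi_dubbi_alt
  rw [← String.toList_inj]
  rw [ubbi_foldl_map, List.nil_append, String.toList_join]
  show _ = ((List.foldl _ word "uaeio".toList).toList)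
  rw [show "uaeio".toList = ['u','a','e','i','o'] from rfl]
  simp only [List.foldl_cons, List.foldl_nil]
  rw [PySem.Str.toList_replace, PySem.Str.toList_replace, PySem.Str.toList_replace,
    PySem.Str.toList_replace, PySem.Str.toList_replace]
  simp only [String.toList_ofList]
  rw [replace_single, replace_single, replace_single, replace_single, replace_single]
  have hub : ∀ v : Char, ("ub" ++ String.ofList [v]).toList = ['u','b',v] := by
    intro v; simp
  rw [hub, hub, hub, hub, hub]
  have hstart : word.toList = word.toList.flatMap (fun c => [c]) := by simp
  conv_rhs => rw [hstart]
  rw [repl1_flatMap, repl1_flatMap, repl1_flatMap, repl1_flatMap, repl1_flatMap]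
  simp only [List.flatten_eq_flatMap, List.flatMap_map, id_eq]
  exact List.flatMap_congr (fun c _ => (staged_piece c).symm)
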